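-- pv_equiv track=rewrite | github.com/jatinjaglan18/p_for_python | 3_number/number_conversion.py | any_base_to_decimal
-- ===== SOURCE A (Python) =====
-- def any_base_to_decimal(n,k):
--     m = 0
--     c_num = 0
--     while n > 0:
--         num = n % 10
--         c_num = c_num + num * (k ** m)
--         m += 1
--         n = n // 10
--
--     return c_num
-- ===== SOURCE B (Python) =====
-- def any_base_to_decimal(n, k):
--     if n <= 0:
--         return 0
--     return any_base_to_decimal(n // 10, k) * k + n % 10
-- ===== Notes on version B (the rewrite author's own statement) =====
-- stated objective: simpler
-- what changed: Replaced the iterative loop that tracks an exponent and recomputes k**m each step with a short Horner-style recursion on n//10 that needs no exponentiation.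
import Mathlib
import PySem

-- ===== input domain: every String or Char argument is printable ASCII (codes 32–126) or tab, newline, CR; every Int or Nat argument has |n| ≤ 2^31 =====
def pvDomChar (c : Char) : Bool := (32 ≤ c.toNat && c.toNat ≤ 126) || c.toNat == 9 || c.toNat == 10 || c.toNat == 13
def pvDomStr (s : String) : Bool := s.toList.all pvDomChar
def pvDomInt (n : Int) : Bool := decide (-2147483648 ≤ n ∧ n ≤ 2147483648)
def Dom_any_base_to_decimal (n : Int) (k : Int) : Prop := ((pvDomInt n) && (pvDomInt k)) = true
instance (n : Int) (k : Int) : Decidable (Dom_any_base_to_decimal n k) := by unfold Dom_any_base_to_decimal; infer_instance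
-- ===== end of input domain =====

-- B replaces A's exponent-tracking loop (recomputing k**m each step) with a Horner-style recursion on n//10; objective: simpler.


-- termination helper used by both ports
theorem pvDiv10_lt (n : Int) (h : 0 < n) : (PySem.Int.floordiv n 10).toNat < n.toNat := by
  rw [PySem.Int.floordiv_eq_ediv_of_pos (by omega)]
  omega

-- ===== PORT A =====
-- the while loop: state (n, m, c_num); m is the exponent, only ever 0,1,2,… so carried as Nat
def anyBaseLoop (k : Int) (n : Int) (m : Nat) (c_num : Int) : Int :=
  if h : n > 0 then
    anyBaseLoop k (PySem.Int.floordiv n 10) (m + 1) (c_num + (PySem.Int.mod n 10) * k ^ m)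
  else c_num
termination_by n.toNat
decreasing_by exact pvDiv10_lt n h

def any_base_to_decimal (n : Int) (k : Int) : Int := anyBaseLoop k n 0 0

-- ===== PORT B =====
def any_base_to_decimal_alt (n : Int) (k : Int) : Int :=
  if h : n ≤ 0 then 0
  else any_base_to_decimal_alt (PySem.Int.floordiv n 10) k * k + PySem.Int.mod n 10
termination_by n.toNat
decreasing_by exact pvDiv10_lt n (by omega)

-- ===== PRECONDITION & SPEC =====
def Spec_any_base_to_decimal (n : Int) (k : Int) (out : Int) : Prop := out = any_base_to_decimal_alt n k
instance (n : Int) (k : Int) (out : Int) : Decidable (Spec_any_base_to_decimal n k out) := by unfold Spec_any_base_to_decimal; infer_instance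

-- ===== CLAIM (what is proved, stated in full; the proofs are below) =====
def Claim_equal_any_base_to_decimal : Prop := ∀ (n : Int) (k : Int), Dom_any_base_to_decimal n k → Spec_any_base_to_decimal n k (any_base_to_decimal n k)

-- ===== LEMMAS AND PROOFS =====
theorem anyBaseLoop_eq_alt (k : Int) (N : Nat) :
    ∀ (n : Int), n.toNat ≤ N → ∀ (m : Nat) (c : Int),
      anyBaseLoop k n m c = c + any_base_to_decimal_alt n k * k ^ m := by
  induction N with
  | zero =>
    intro n hn m c
    have hle : n ≤ 0 := by omega
    rw [anyBaseLoop, any_base_to_decimal_alt]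
    simp [hle, not_lt.mpr hle]
  | succ N ih =>
    intro n hn m c
    by_cases h : n > 0
    · rw [anyBaseLoop, any_base_to_decimal_alt]
      simp only [h, dif_pos, not_le.mpr h, dif_neg, not_lt.mpr (le_of_lt h)]
      rw [ih _ (by have := pvDiv10_lt n h; omega)]
      simp only [dif_neg not_false]
      ring
    · rw [anyBaseLoop, any_base_to_decimal_alt]
      simp [h, show n ≤ 0 by omega]

-- ===== VERDICT (by name: the statement is the Claim_ definition above) =====
theorem any_base_to_decimal_spec : Claim_equal_any_base_to_decimal := by
  intro n k _
  unfold Spec_any_base_to_decimal any_base_to_decimal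
  rw [anyBaseLoop_eq_alt k n.toNat n le_rfl 0 0]
  ring
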